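-- pv_equiv track=rewrite | github.com/AleCanzo/Project-Euler-0-50 | 021. Amicable Numbers.py | sum_div_num_list
-- ===== SOURCE A (Python) =====
-- def sum_div_num_list(d, n):
--     d.append(0)
--     for i in range(1, n):
--         s = 0
--         for j in range(1,i):
--             if i%j == 0:
--                 s = s + j
--         d.append(s)
--     return d
-- ===== SOURCE B (Python) =====
-- def sum_div_num_list(d, n):
--     d.append(0)
--     if n > 1:
--         s = [0] * n
--         for j in range(1, n):
--             for k in range(2 * j, n, j):
--                 s[k] += j
--         d.extend(s[1:])
--     return d
-- ===== Notes on version B (the rewrite author's own statement) =====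
-- stated objective: faster
-- what changed: Replaced A's per-number trial division (inner loop over all j < i for every i) by a divisor sieve that allocates an array of size n and adds each j to all of its proper multiples, then extends d with the sieved sums.
import Mathlib
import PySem

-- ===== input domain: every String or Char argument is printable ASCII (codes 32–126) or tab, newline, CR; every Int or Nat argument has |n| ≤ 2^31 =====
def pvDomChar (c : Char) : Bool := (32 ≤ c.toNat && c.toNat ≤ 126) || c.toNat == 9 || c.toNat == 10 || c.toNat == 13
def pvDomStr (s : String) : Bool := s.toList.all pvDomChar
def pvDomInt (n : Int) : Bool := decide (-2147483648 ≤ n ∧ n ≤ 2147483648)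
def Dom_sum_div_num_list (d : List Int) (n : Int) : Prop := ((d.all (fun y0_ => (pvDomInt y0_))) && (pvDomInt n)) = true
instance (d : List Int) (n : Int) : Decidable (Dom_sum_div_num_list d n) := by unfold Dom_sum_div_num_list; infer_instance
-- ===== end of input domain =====

-- B replaces A's quadratic per-i trial division by a divisor sieve that adds each j to all its
-- multiples (objective: faster). Both A and B mutate the argument list d in place in Python
-- (A appends, B appends/extends); the proved equivalence is about the return value.

-- ===== PORT A =====
def sum_div_num_list (d : List Int) (n : Int) : List Int :=
  let d := d ++ [0]
  (PySem.List.pyRange 1 n 1).foldl (fun d i =>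
    d ++ [(PySem.List.pyRange 1 i 1).foldl
            (fun s j => if PySem.Int.mod i j = 0 then s + j else s) 0]) d

-- ===== PORT B =====
def sum_div_num_list_alt (d : List Int) (n : Int) : List Int :=
  let d := d ++ [0]
  if 1 < n then
    let s : List Int := List.replicate n.toNat 0
    let s := (PySem.List.pyRange 1 n 1).foldl (fun s j =>
      (PySem.List.pyRange (2 * j) n j).foldl
        (fun s k => s.set k.toNat (s.getD k.toNat 0 + j)) s) s
    d ++ s.drop 1
  else d

-- ===== PRECONDITION & SPEC =====
def Spec_sum_div_num_list (d : List Int) (n : Int) (out : List Int) : Prop := out = sum_div_num_list_alt d n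
instance (d : List Int) (n : Int) (out : List Int) : Decidable (Spec_sum_div_num_list d n out) := by unfold Spec_sum_div_num_list; infer_instance

-- ===== CLAIM (what is proved, stated in full; the proofs are below) =====
def Claim_equal_sum_div_num_list : Prop := ∀ (d : List Int) (n : Int), Dom_sum_div_num_list d n → Spec_sum_div_num_list d n (sum_div_num_list d n)

-- ===== LEMMAS AND PROOFS =====

-- A's proper-divisor sum of i (the inner loop of A)
def pvSigma (i : Int) : Int :=
  (PySem.List.pyRange 1 i 1).foldl
    (fun s j => if PySem.Int.mod i j = 0 then s + j else s) 0

-- the inner sieve loop: add j at every index in L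
def pvInner (j : Int) (s : List Int) (L : List Int) : List Int :=
  L.foldl (fun s k => s.set k.toNat (s.getD k.toNat 0 + j)) s

lemma pvInner_length (j : Int) (L : List Int) (s : List Int) :
    (pvInner j s L).length = s.length := by
  induction L generalizing s with
  | nil => rfl
  | cons k L ih => simp [pvInner, List.foldl_cons] at *; rw [ih]; simp

lemma pvInner_getD (j : Int) (L : List Int) (hL : ∀ k ∈ L, 0 ≤ k)
    (s : List Int) (i : Nat) (hi : i < s.length) :
    (pvInner j s L).getD i 0 = s.getD i 0 + j * (L.count (i : Int)) := by
  induction L generalizing s with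
  | nil => simp [pvInner]
  | cons k L ih =>
    have hk : 0 ≤ k := hL k (by simp)
    have hrest : ∀ k' ∈ L, 0 ≤ k' := fun k' h => hL k' (by simp [h])
    have hlen : (s.set k.toNat (s.getD k.toNat 0 + j)).length = s.length := by simp
    have := ih hrest (s.set k.toNat (s.getD k.toNat 0 + j)) (by omega)
    simp only [pvInner, List.foldl_cons] at *
    rw [this]
    have hset : (s.set k.toNat (s.getD k.toNat 0 + j)).getD i 0 =
        if k.toNat = i then s.getD i 0 + j else s.getD i 0 := by
      by_cases h : k.toNat = i
      · subst h
        rw [List.getD_eq_getElem _ _ (by omega), List.getElem_set_self (by omega)]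
        simp
      · rw [List.getD_eq_getElem?_getD, List.getElem?_set, if_neg h,
            ← List.getD_eq_getElem?_getD, if_neg h]
    rw [hset, List.count_cons]
    by_cases h : k.toNat = i
    · have hk2 : k = (i : Int) := by omega
      simp [hk2]; ring
    · have hk2 : k ≠ (i : Int) := by omega
      simp [h, hk2]

-- the outer sieve loop over a list J of step sizes
def pvOuter (n : Int) (s : List Int) (J : List Int) : List Int :=
  J.foldl (fun s j => pvInner j s (PySem.List.pyRange (2 * j) n j)) s

lemma pvOuter_length (n : Int) (J : List Int) (s : List Int) :
    (pvOuter n s J).length = s.length := by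
  induction J generalizing s with
  | nil => rfl
  | cons j J ih => simp only [pvOuter, List.foldl_cons] at *; rw [ih, pvInner_length]

lemma pvOuter_getD (n : Int) (J : List Int) (hJ : ∀ j ∈ J, 0 < j)
    (s : List Int) (i : Nat) (hi : i < s.length) :
    (pvOuter n s J).getD i 0 =
      s.getD i 0 +
        (J.map (fun j => j * ((PySem.List.pyRange (2 * j) n j).count (i : Int)))).sum := by
  induction J generalizing s with
  | nil => simp [pvOuter]
  | cons j J ih =>
    have hj : 0 < j := hJ j (by simp)
    have hrest : ∀ j' ∈ J, 0 < j' := fun j' h => hJ j' (by simp [h])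
    have hnn : ∀ k ∈ PySem.List.pyRange (2 * j) n j, 0 ≤ k := by
      intro k hk
      rcases (PySem.List.mem_pyRange_iff_of_pos hj k).1 hk with ⟨h1, _, _⟩
      omega
    simp only [pvOuter, List.foldl_cons] at *
    rw [ih hrest _ (by rw [pvInner_length]; exact hi),
        pvInner_getD j _ hnn s i hi]
    simp [add_assoc]

lemma pvNodup_pyRange_pos (a b s : Int) (hs : 0 < s) :
    (PySem.List.pyRange a b s).Nodup := by
  rw [PySem.List.pyRange_of_pos a b hs]
  refine List.Nodup.map ?_ (List.nodup_range)
  intro x y h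
  have hxy : s * (x : Int) = s * (y : Int) := by linarith
  have := mul_left_cancel₀ (ne_of_gt hs) hxy
  exact_mod_cast this

lemma pvCount_pyRange (a b s x : Int) (hs : 0 < s) :
    (PySem.List.pyRange a b s).count x =
      if a ≤ x ∧ x < b ∧ s ∣ x - a then 1 else 0 := by
  by_cases h : a ≤ x ∧ x < b ∧ s ∣ x - a
  · rw [if_pos h]
    exact List.count_eq_one_of_mem (pvNodup_pyRange_pos a b s hs)
      ((PySem.List.mem_pyRange_iff_of_pos hs x).2 h)
  · rw [if_neg h]
    exact List.count_eq_zero_of_not_mem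
      (fun hm => h ((PySem.List.mem_pyRange_iff_of_pos hs x).1 hm))

lemma pvSigma_eq_sum (i : Int) :
    pvSigma i = ((PySem.List.pyRange 1 i 1).map
      (fun j => if PySem.Int.mod i j = 0 then j else 0)).sum := by
  unfold pvSigma
  have h : (fun (s j : Int) => if PySem.Int.mod i j = 0 then s + j else s)
      = fun s j => s + (if PySem.Int.mod i j = 0 then j else 0) := by
    funext s j; split <;> simp
  rw [h, PySem.List.foldl_add]
  simp

lemma pvFmod_zero_iff (i j : Int) (hj : 0 < j) :
    PySem.Int.mod i j = 0 ↔ j ∣ i := by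
  rw [PySem.Int.mod, Int.fmod_eq_emod_of_nonneg _ (le_of_lt hj)]
  exact Iff.symm Int.dvd_iff_emod_eq_zero

-- the sieved value at index i equals A's inner-loop sum, for 0 ≤ i < n
lemma pvSieve_value (n : Int) (i : Nat) (hi : (i : Int) < n) :
    ((PySem.List.pyRange 1 n 1).map
      (fun j => j * ((PySem.List.pyRange (2 * j) n j).count (i : Int)))).sum
      = pvSigma i := by
  rw [pvSigma_eq_sum]
  have hterm : ∀ j ∈ PySem.List.pyRange 1 n 1,
      j * ((PySem.List.pyRange (2 * j) n j).count (i : Int)) =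
        if 2 * j ≤ (i : Int) ∧ j ∣ (i : Int) then j else 0 := by
    intro j hj
    rcases (PySem.List.mem_pyRange_one).1 hj with ⟨h1, h2⟩
    rw [pvCount_pyRange _ _ _ _ (by omega)]
    have hdvd : (j ∣ (i : Int) - 2 * j) ↔ j ∣ (i : Int) := by
      constructor
      · intro h; have := dvd_add h (Dvd.intro 2 (mul_comm j 2)); simpa using this
      · intro h; exact dvd_sub h (Dvd.intro 2 (mul_comm j 2))
    by_cases hc : 2 * j ≤ (i : Int) ∧ j ∣ (i : Int)
    · rw [if_pos ⟨hc.1, hi, hdvd.2 hc.2⟩, if_pos hc]; ring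
    · rw [if_neg (by intro ⟨u1, u2, u3⟩; exact hc ⟨u1, hdvd.1 u3⟩), if_neg hc]; ring
  rw [List.map_congr_left hterm]
  by_cases hi1 : 1 ≤ (i : Int)
  · -- split the range at i
    rw [PySem.List.pyRange_one_append 1 (i : Int) n hi1 (le_of_lt hi),
        List.map_append, List.sum_append]
    have htail : ((PySem.List.pyRange (i : Int) n 1).map
        (fun j => if 2 * j ≤ (i : Int) ∧ j ∣ (i : Int) then j else 0)).sum = 0 := by
      apply List.sum_eq_zero
      intro x hx
      simp only [List.mem_map] at hx
      rcases hx with ⟨j, hj, rfl⟩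
      rcases (PySem.List.mem_pyRange_one).1 hj with ⟨h1, _⟩
      rw [if_neg]; intro ⟨u1, _⟩; omega
    rw [htail, add_zero]
    apply congrArg
    apply List.map_congr_left
    intro j hj
    rcases (PySem.List.mem_pyRange_one).1 hj with ⟨h1, h2⟩
    simp only [pvFmod_zero_iff _ _ (by omega : (0:Int) < j)]
    by_cases hd : j ∣ (i : Int)
    · rcases hd with ⟨q, hq⟩
      have hq2 : 2 ≤ q := by nlinarith
      rw [if_pos ⟨by nlinarith, ⟨q, hq⟩⟩, if_pos ⟨q, hq⟩]
    · rw [if_neg (fun h => hd h.2), if_neg hd]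
  · -- i = 0 : both sides are 0
    have hi0 : (i : Int) = 0 := by omega
    rw [hi0]
    rw [PySem.List.pyRange_one_eq_nil (by omega : (0:Int) ≤ 1)]
    simp only [List.map_nil, List.sum_nil]
    apply List.sum_eq_zero
    intro x hx
    simp only [List.mem_map] at hx
    rcases hx with ⟨j, hj, rfl⟩
    rcases (PySem.List.mem_pyRange_one).1 hj with ⟨h1, _⟩
    rw [if_neg]; intro ⟨u1, _⟩; omega

lemma pvSieve_eq_map (n : Int) (hn : 1 < n) :
    pvOuter n (List.replicate n.toNat 0) (PySem.List.pyRange 1 n 1)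
      = (PySem.List.pyRange 0 n 1).map pvSigma := by
  apply List.ext_getElem
  · rw [pvOuter_length]
    simp [PySem.List.length_pyRange_one]
  · intro i h1 h2
    have hlen : (pvOuter n (List.replicate n.toNat 0) (PySem.List.pyRange 1 n 1)).length
        = n.toNat := by rw [pvOuter_length]; simp
    have hiN : i < n.toNat := by omega
    have hposJ : ∀ j ∈ PySem.List.pyRange 1 n 1, 0 < j := by
      intro j hj; rcases (PySem.List.mem_pyRange_one).1 hj with ⟨u, _⟩; omega
    have := pvOuter_getD n (PySem.List.pyRange 1 n 1) hposJ
      (List.replicate n.toNat 0) i (by simpa using hiN)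
    rw [List.getD_eq_getElem _ _ (by omega)] at this
    rw [this, List.getD_replicate _ hiN, pvSieve_value n i (by omega)]
    simp only [List.getElem_map, PySem.List.getElem_pyRange_one]
    simp
theorem pv_main (d : List Int) (n : Int) :
    sum_div_num_list d n = sum_div_num_list_alt d n := by
  unfold sum_div_num_list sum_div_num_list_alt
  simp only []
  rw [PySem.List.foldl_append_singleton_eq_map
    (fun i => (PySem.List.pyRange 1 i 1).foldl
      (fun s j => if PySem.Int.mod i j = 0 then s + j else s) 0)]
  by_cases hn : 1 < n
  · rw [if_pos hn]
    have := pvSieve_eq_map n hn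
    unfold pvOuter pvInner at this
    rw [this]
    rw [PySem.List.pyRange_one_cons (by omega : (0:Int) < n), List.map_cons]
    simp [pvSigma]
  · rw [if_neg hn, PySem.List.pyRange_one_eq_nil (by omega : n ≤ 1)]
    simp

-- ===== VERDICT (by name: the statement is the Claim_ definition above) =====
theorem sum_div_num_list_spec : Claim_equal_sum_div_num_list := by
  intro d n _
  unfold Spec_sum_div_num_list
  exact pv_main d n
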